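-- pv_equiv track=rewrite | github.com/angadsinghsandhu/Notes | Interview/leetcode/Solutions/18 Org/meta/OA/local_maxi.py | findLocalMaximums
-- ===== SOURCE A (Python) =====
-- def findLocalMaximums(matrix):
--     """
--     Finds all local maximums in the given matrix.
--
--     Args:
--         matrix (List[List[int]]): A 2D list of integers representing the matrix.
--
--     Returns:
--         List[List[int]]: A list of [row, col] coordinates of local maximums sorted as per the requirements.
--
--     Thought Process:
--     - For each non-zero element in the matrix, calculate its region based on its value.
--     - Iterate over the region (excluding the corners and the element itself).
--     - Check if any non-zero element within the region is greater than or equal to the current element.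
--     - If none are found, add the coordinates to the result list.
--     - Finally, sort the result list by row index and then by column index.
--
--     Time Complexity: O(n * m * max_s^2), where n and m are the dimensions of the matrix, and max_s is the maximum side length of the regions.
--     Space Complexity: O(k), where k is the number of local maximums found.
--     """
--     n = len(matrix)
--     m = len(matrix[0]) if n > 0 else 0
--     result = []
--
--     for i in range(n):
--         for j in range(m):
--             if matrix[i][j] != 0:
--                 value = matrix[i][j]
--                 s = value * 2 + 1
--
--                 row_min = max(0, i - value)
--                 row_max = min(n - 1, i + value)
--                 col_min = max(0, j - value)
--                 col_max = min(m - 1, j + value)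
--
--                 is_local_maximum = True
--
--                 for r in range(row_min, row_max + 1):
--                     for c in range(col_min, col_max + 1):
--                         if (r == i and c == j):
--                             continue  # Skip the element itself
--                         # Exclude the corners
--                         if abs(r - i) == value and abs(c - j) == value:
--                             continue
--                         if matrix[r][c] != 0 and matrix[r][c] >= value:
--                             is_local_maximum = False
--                             break
--                     if not is_local_maximum:
--                         break
--
--                 if is_local_maximum:
--                     result.append([i, j])
--
--     # Sort the result as per the requirements
--     result.sort(key=lambda x: (x[0], x[1]))
--     return result
-- ===== SOURCE B (Python) =====
-- def findLocalMaximums(matrix):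
--     n = len(matrix)
--     m = len(matrix[0]) if n > 0 else 0
--     # one pass: collect the nonzero cells once; then test each candidate
--     # against that (usually much shorter) list instead of rescanning its region
--     cells = [(i, j, matrix[i][j])
--              for i in range(n) for j in range(m) if matrix[i][j] != 0]
--     result = []
--     for (i, j, v) in cells:
--         blocked = any(
--             abs(r - i) <= v and abs(c - j) <= v
--             and not (r == i and c == j)
--             and not (abs(r - i) == v and abs(c - j) == v)
--             and w >= v
--             for (r, c, w) in cells)
--         if not blocked:
--             result.append([i, j])
--     return result
-- ===== Notes on version B (the rewrite author's own statement) =====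
-- stated objective: alternative
-- what changed: B collects the nonzero cells in one row-major pass and tests each candidate only against that list (no per-cell rescan of its value-sized region, and no final sort since row-major emission is already sorted); A rescans the whole clipped region for every nonzero cell and then sorts.
import Mathlib
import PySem

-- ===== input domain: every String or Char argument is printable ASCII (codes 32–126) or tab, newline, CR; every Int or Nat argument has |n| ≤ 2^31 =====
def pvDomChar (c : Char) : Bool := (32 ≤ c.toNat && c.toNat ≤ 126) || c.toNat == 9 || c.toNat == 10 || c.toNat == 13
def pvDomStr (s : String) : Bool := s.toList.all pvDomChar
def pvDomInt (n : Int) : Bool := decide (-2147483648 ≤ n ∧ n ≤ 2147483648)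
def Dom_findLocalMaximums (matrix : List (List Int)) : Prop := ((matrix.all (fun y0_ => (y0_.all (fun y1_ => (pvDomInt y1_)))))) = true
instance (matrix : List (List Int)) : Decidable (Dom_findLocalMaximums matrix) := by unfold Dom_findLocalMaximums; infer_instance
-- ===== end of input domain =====

-- B replaces A's per-cell rescan of the whole value-sized region by one pass that
-- collects the nonzero cells and tests each candidate against that list only
-- (objective: alternative; equal return values, no speed claim).

-- shared accessor: matrix[i][j] for the in-range nonnegative indices both programs use
def pvCell (matrix : List (List Int)) (i j : Int) : Int :=
  PySem.List.pyGetD (PySem.List.pyGetD matrix i []) j 0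

-- ===== PORT A =====
def findLocalMaximums (matrix : List (List Int)) : List (List Int) :=
  let n : Int := matrix.length
  let m : Int := if n > 0 then ((matrix.headD []).length : Int) else 0
  let result : List (List Int) :=
    (PySem.List.pyRange 0 n 1).foldl (fun result i =>
      (PySem.List.pyRange 0 m 1).foldl (fun result j =>
        if pvCell matrix i j ≠ 0 then
          let value := pvCell matrix i j
          let row_min := max 0 (i - value)
          let row_max := min (n - 1) (i + value)
          let col_min := max 0 (j - value)
          let col_max := min (m - 1) (j + value)
          let is_local_maximum :=
            (PySem.List.pyRange row_min (row_max + 1) 1).all (fun r =>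
              (PySem.List.pyRange col_min (col_max + 1) 1).all (fun c =>
                if r = i ∧ c = j then true          -- skip the element itself
                else if |r - i| = value ∧ |c - j| = value then true   -- exclude the corners
                else !(pvCell matrix r c ≠ 0 && pvCell matrix r c ≥ value)))
          if is_local_maximum then result ++ [[i, j]] else result
        else result) result) []
  PySem.List.sorted2 result (fun x => PySem.List.pyGetD x 0 0) (fun x => PySem.List.pyGetD x 1 0)

-- ===== PORT B =====
def findLocalMaximums_alt (matrix : List (List Int)) : List (List Int) :=
  let n : Int := matrix.length
  let m : Int := if n > 0 then ((matrix.headD []).length : Int) else 0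
  let cells : List (Int × Int × Int) :=
    (PySem.List.pyRange 0 n 1).flatMap (fun i =>
      (PySem.List.pyRange 0 m 1).filterMap (fun j =>
        if pvCell matrix i j ≠ 0 then some (i, j, pvCell matrix i j) else none))
  cells.foldl (fun result cell =>
    let i := cell.1
    let j := cell.2.1
    let v := cell.2.2
    let blocked := cells.any (fun rcw =>
      |rcw.1 - i| ≤ v && |rcw.2.1 - j| ≤ v
        && !(rcw.1 = i && rcw.2.1 = j)
        && !(|rcw.1 - i| = v && |rcw.2.1 - j| = v)
        && rcw.2.2 ≥ v)
    if !blocked then result ++ [[i, j]] else result) []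

-- ===== PRECONDITION & SPEC =====
-- Pre_ excludes exactly the ragged matrices (a row shorter than the first row),
-- on which the Python A raises IndexError.
def Pre_findLocalMaximums (matrix : List (List Int)) : Prop :=
  ∀ row ∈ matrix, (matrix.headD []).length ≤ row.length
instance (matrix : List (List Int)) : Decidable (Pre_findLocalMaximums matrix) := by
  unfold Pre_findLocalMaximums; infer_instance

def pvWitness_findLocalMaximums : List (List Int) := [[1, 0], [0, 3]]

def Spec_findLocalMaximums (matrix : List (List Int)) (out : List (List Int)) : Prop := out = findLocalMaximums_alt matrix
instance (matrix : List (List Int)) (out : List (List Int)) : Decidable (Spec_findLocalMaximums matrix out) := by unfold Spec_findLocalMaximums; infer_instance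

-- ===== CLAIM (what is proved, stated in full; the proofs are below) =====
def Claim_equal_findLocalMaximums : Prop := ∀ (matrix : List (List Int)), Dom_findLocalMaximums matrix → Pre_findLocalMaximums matrix → Spec_findLocalMaximums matrix (findLocalMaximums matrix)

-- ===== LEMMAS AND PROOFS =====

def pvM (matrix : List (List Int)) : Int :=
  if (matrix.length : Int) > 0 then ((matrix.headD []).length : Int) else 0

def pvOk (matrix : List (List Int)) (i j : Int) : Bool :=
  let value := pvCell matrix i j
  let n : Int := matrix.length
  let m : Int := pvM matrix
  (PySem.List.pyRange (max 0 (i - value)) (min (n - 1) (i + value) + 1) 1).all (fun r =>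
    (PySem.List.pyRange (max 0 (j - value)) (min (m - 1) (j + value) + 1) 1).all (fun c =>
      if r = i ∧ c = j then true
      else if |r - i| = value ∧ |c - j| = value then true
      else !(pvCell matrix r c ≠ 0 && pvCell matrix r c ≥ value)))

def pvCellsOf (matrix : List (List Int)) : List (Int × Int × Int) :=
  (PySem.List.pyRange 0 matrix.length 1).flatMap (fun i =>
    (PySem.List.pyRange 0 (pvM matrix) 1).filterMap (fun j =>
      if pvCell matrix i j ≠ 0 then some (i, j, pvCell matrix i j) else none))

def pvPred (i j v : Int) (rcw : Int × Int × Int) : Bool :=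
  |rcw.1 - i| ≤ v && |rcw.2.1 - j| ≤ v
    && !(rcw.1 = i && rcw.2.1 = j)
    && !(|rcw.1 - i| = v && |rcw.2.1 - j| = v)
    && rcw.2.2 ≥ v

-- membership in the cell list
theorem mem_pvCellsOf (matrix : List (List Int)) (c : Int × Int × Int) :
    c ∈ pvCellsOf matrix ↔
      0 ≤ c.1 ∧ c.1 < matrix.length ∧ 0 ≤ c.2.1 ∧ c.2.1 < pvM matrix ∧
        pvCell matrix c.1 c.2.1 ≠ 0 ∧ c.2.2 = pvCell matrix c.1 c.2.1 := by
  obtain ⟨r, c', w⟩ := c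
  simp only [pvCellsOf, List.mem_flatMap, List.mem_filterMap, PySem.List.mem_pyRange_one]
  constructor
  · rintro ⟨i, ⟨hi0, hin⟩, j, ⟨hj0, hjm⟩, h⟩
    split_ifs at h with hnz
    simp only [Option.some.injEq, Prod.mk.injEq] at h
    obtain ⟨rfl, rfl, rfl⟩ := h
    exact ⟨hi0, hin, hj0, hjm, hnz, rfl⟩
  · rintro ⟨h1, h2, h3, h4, h5, h6⟩
    exact ⟨r, ⟨h1, h2⟩, c', ⟨h3, h4⟩, by simp [h5, h6]⟩

-- A's region scan finds no blocker iff no cell in the nonzero-cell list blocks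
theorem pvOk_eq_not_any (matrix : List (List Int)) (i j : Int) :
    pvOk matrix i j = !((pvCellsOf matrix).any (pvPred i j (pvCell matrix i j))) := by
  rw [Bool.eq_iff_iff]
  simp only [pvOk, List.all_eq_true, PySem.List.mem_pyRange_one, Bool.not_eq_eq_eq_not,
    Bool.not_true, List.any_eq_false, pvPred]
  constructor
  · intro hL c hc
    obtain ⟨hr0, hrn, hc0, hcm, hnz, hw⟩ := (mem_pvCellsOf matrix c).mp hc
    by_cases hri : |c.1 - i| ≤ pvCell matrix i j
    · by_cases hcj : |c.2.1 - j| ≤ pvCell matrix i j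
      · have habs1 := abs_cases (c.1 - i)
        have habs2 := abs_cases (c.2.1 - j)
        have h := hL c.1 ⟨by omega, by omega⟩ c.2.1 ⟨by omega, by omega⟩
        split_ifs at h with h1 h2
        · simp [h1.1, h1.2]
        · simp [h2, hw]
        · simp only [Bool.not_eq_true', Bool.and_eq_false_iff, decide_eq_false_iff_not] at h
          rcases h with h | h
          · exact absurd hnz h
          · simp [hw, h]
      · simp [hcj]
    · simp [hri]
  · intro hR r hr c hc
    split_ifs with h1 h2
    · rfl
    · rfl
    · simp only [Bool.not_eq_true', Bool.and_eq_false_iff, decide_eq_false_iff_not]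
      by_cases hz : pvCell matrix r c = 0
    
      · exact Or.inl (fun hh => hh hz)
      · by_cases hge : pvCell matrix r c ≥ pvCell matrix i j
        · exfalso
          have h0r : (0 : Int) ≤ r := le_trans (le_max_left _ _) hr.1
          have hrv : i - pvCell matrix i j ≤ r := le_trans (le_max_right _ _) hr.1
          have hrn : r < (matrix.length : Int) := by
            have := min_le_left ((matrix.length : Int) - 1) (i + pvCell matrix i j)
            omega
          have hrv2 : r ≤ i + pvCell matrix i j := by
            have := min_le_right ((matrix.length : Int) - 1) (i + pvCell matrix i j)
            omega
          have h0c : (0 : Int) ≤ c := le_trans (le_max_left _ _) hc.1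
          have hcv : j - pvCell matrix i j ≤ c := le_trans (le_max_right _ _) hc.1
          have hcm : c < pvM matrix := by
            have := min_le_left (pvM matrix - 1) (j + pvCell matrix i j)
            omega
          have hcv2 : c ≤ j + pvCell matrix i j := by
            have := min_le_right (pvM matrix - 1) (j + pvCell matrix i j)
            omega
          have hmem : (r, c, pvCell matrix r c) ∈ pvCellsOf matrix :=
            (mem_pvCellsOf _ _).mpr ⟨h0r, hrn, h0c, hcm, hz, rfl⟩
          have hfalse := hR _ hmem
          have habs1 := abs_cases (r - i)
          have habs2 := abs_cases (c - j)
          simp only [Bool.and_eq_true, decide_eq_true_eq, not_and, not_le] at hfalse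
          have hlt := hfalse ⟨⟨⟨abs_le.mpr ⟨by omega, by omega⟩, abs_le.mpr ⟨by omega, by omega⟩⟩,
            (by by_cases hA : r = i <;> by_cases hB : c = j <;> simp_all)⟩,
            (by by_cases hA : |r - i| = pvCell matrix i j <;> by_cases hB : |c - j| = pvCell matrix i j <;> simp_all)⟩
          omega
        · exact Or.inr hge

def pvXA (matrix : List (List Int)) : List (List Int) :=
  (PySem.List.pyRange 0 matrix.length 1).flatMap (fun i =>
    ((PySem.List.pyRange 0 (pvM matrix) 1).filter
        (fun j => decide (pvCell matrix i j ≠ 0) && pvOk matrix i j)).map (fun j => [i, j]))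

theorem pv_filter_map_eq_filterMap {α β : Type} (p : α → Bool) (f : α → β) (l : List α) :
    (l.filter p).map f = l.filterMap (fun x => if p x then some (f x) else none) := by
  induction l with
  | nil => rfl
  | cons a l ih => by_cases h : p a <;> simp [h, ih]

theorem A_shape (matrix : List (List Int)) :
    findLocalMaximums matrix =
      PySem.List.sorted2 (pvXA matrix)
        (fun x => PySem.List.pyGetD x 0 0) (fun x => PySem.List.pyGetD x 1 0) := by
  have hbody : ∀ i : Int,
      (fun (result : List (List Int)) (j : Int) =>
        if pvCell matrix i j ≠ 0 then
          let value := pvCell matrix i j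
          let row_min := max 0 (i - value)
          let row_max := min ((matrix.length : Int) - 1) (i + value)
          let col_min := max 0 (j - value)
          let col_max := min ((if (matrix.length : Int) > 0 then ((matrix.headD []).length : Int) else 0) - 1) (j + value)
          let is_local_maximum :=
            (PySem.List.pyRange row_min (row_max + 1) 1).all (fun r =>
              (PySem.List.pyRange col_min (col_max + 1) 1).all (fun c =>
                if r = i ∧ c = j then true
                else if |r - i| = value ∧ |c - j| = value then true
                else !(pvCell matrix r c ≠ 0 && pvCell matrix r c ≥ value)))
          if is_local_maximum then result ++ [[i, j]] else result
        else result)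
      = fun result j =>
          if decide (pvCell matrix i j ≠ 0) && pvOk matrix i j then result ++ [[i, j]] else result := by
    intro i
    funext result j
    by_cases h1 : pvCell matrix i j ≠ 0
    · rw [if_pos h1]
      have hd : decide (pvCell matrix i j ≠ 0) = true := by simpa using h1
      rw [hd, Bool.true_and]
      rfl
    · rw [if_neg h1]
      have hd : decide (pvCell matrix i j ≠ 0) = false := by simpa using h1
      rw [hd, Bool.false_and]
      simp
  have houter : (fun (result : List (List Int)) (i : Int) =>
      List.foldl
      (fun (result : List (List Int)) (j : Int) =>
        if pvCell matrix i j ≠ 0 then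
          let value := pvCell matrix i j
          let row_min := max 0 (i - value)
          let row_max := min ((matrix.length : Int) - 1) (i + value)
          let col_min := max 0 (j - value)
          let col_max := min ((if (matrix.length : Int) > 0 then ((matrix.headD []).length : Int) else 0) - 1) (j + value)
          let is_local_maximum :=
            (PySem.List.pyRange row_min (row_max + 1) 1).all (fun r =>
              (PySem.List.pyRange col_min (col_max + 1) 1).all (fun c =>
                if r = i ∧ c = j then true
                else if |r - i| = value ∧ |c - j| = value then true
                else !(pvCell matrix r c ≠ 0 && pvCell matrix r c ≥ value)))
          if is_local_maximum then result ++ [[i, j]] else result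
        else result)
        result (PySem.List.pyRange 0 (if (matrix.length : Int) > 0 then ((matrix.headD []).length : Int) else 0) 1))
      = fun result i => result ++
          (((PySem.List.pyRange 0 (pvM matrix) 1).filter
            (fun j => decide (pvCell matrix i j ≠ 0) && pvOk matrix i j)).map (fun j => [i, j])) := by
    funext result i
    rw [hbody i, PySem.List.foldl_append_if]
    rfl
  simp only [findLocalMaximums]
  rw [houter, PySem.List.foldl_append_eq_flatMap, List.nil_append]
  rfl
theorem B_shape (matrix : List (List Int)) :
    findLocalMaximums_alt matrix =
      ((pvCellsOf matrix).filter
          (fun c => !((pvCellsOf matrix).any (pvPred c.1 c.2.1 c.2.2)))).map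
        (fun c => [c.1, c.2.1]) := by
  simp only [findLocalMaximums_alt]
  rw [show ((PySem.List.pyRange 0 (matrix.length : Int) 1).flatMap (fun i =>
      (PySem.List.pyRange 0 (if (matrix.length : Int) > 0 then ((matrix.headD []).length : Int) else 0) 1).filterMap (fun j =>
        if pvCell matrix i j ≠ 0 then some (i, j, pvCell matrix i j) else none)))
      = pvCellsOf matrix from rfl]
  rw [show (fun (result : List (List Int)) (cell : Int × Int × Int) =>
        if (!(pvCellsOf matrix).any fun rcw =>
              decide (|rcw.1 - cell.1| ≤ cell.2.2) && decide (|rcw.2.1 - cell.2.1| ≤ cell.2.2) &&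
                    !(decide (rcw.1 = cell.1) && decide (rcw.2.1 = cell.2.1)) &&
                  !(decide (|rcw.1 - cell.1| = cell.2.2) && decide (|rcw.2.1 - cell.2.1| = cell.2.2)) &&
                decide (rcw.2.2 ≥ cell.2.2)) = true then
          result ++ [[cell.1, cell.2.1]]
        else result)
      = fun (result : List (List Int)) (cell : Int × Int × Int) =>
          if (!((pvCellsOf matrix).any (pvPred cell.1 cell.2.1 cell.2.2))) = true then
            result ++ [[cell.1, cell.2.1]] else result from rfl]
  rw [PySem.List.foldl_append_if
    (p := fun c : Int × Int × Int => !((pvCellsOf matrix).any (pvPred c.1 c.2.1 c.2.2)))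
    (f := fun c : Int × Int × Int => [c.1, c.2.1])]
  rfl

theorem XA_eq (matrix : List (List Int)) :
    pvXA matrix =
      ((pvCellsOf matrix).filter
          (fun c => !((pvCellsOf matrix).any (pvPred c.1 c.2.1 c.2.2)))).map
        (fun c => [c.1, c.2.1]) := by
  set q : Int × Int × Int → Bool :=
    fun c => !((pvCellsOf matrix).any (pvPred c.1 c.2.1 c.2.2)) with hq
  unfold pvXA
  conv_rhs => rw [pvCellsOf]
  rw [List.filter_flatMap, List.map_flatMap]
  apply List.flatMap_congr
  intro i hi
  rw [PySem.List.mem_pyRange_one] at hi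
  rw [List.filter_filterMap, List.map_filterMap, pv_filter_map_eq_filterMap]
  apply List.filterMap_congr
  intro j hj
  rw [PySem.List.mem_pyRange_one] at hj
  by_cases h1 : pvCell matrix i j ≠ 0
  · rw [if_pos h1]
    have hok := pvOk_eq_not_any matrix i j
    have hd : decide (pvCell matrix i j ≠ 0) = true := by simpa using h1
    rw [hd, Bool.true_and, hok]
    rw [show Option.filter q (some (i, j, pvCell matrix i j))
        = if q (i, j, pvCell matrix i j) then some (i, j, pvCell matrix i j) else none from rfl]
    rw [show q (i, j, pvCell matrix i j)
        = !((pvCellsOf matrix).any (pvPred i j (pvCell matrix i j))) from rfl]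
    by_cases h2 : (pvCellsOf matrix).any (pvPred i j (pvCell matrix i j)) <;>
      simp only [h2] <;> rfl
  · rw [if_neg h1]
    have hd : decide (pvCell matrix i j ≠ 0) = false := by simpa using h1
    rw [hd, Bool.false_and]
    rfl

-- identity of Python's stable sort on an already strictly (lexicographically) sorted list
theorem pv_foldl_insertBy_eq {α : Type} (before : α → α → Bool) :
    ∀ (xs acc : List α), (acc ++ xs).Pairwise (fun a b => before b a = false) →
      xs.foldl (fun acc x => PySem.List.insertBy before x acc) acc = acc ++ xs := by
  intro xs
  induction xs with
  | nil => intro acc _; simp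
  | cons x xs ih =>
    intro acc h
    have hins : PySem.List.insertBy before x acc = acc ++ [x] := by
      apply PySem.List.insertBy_of_forall_not_before
      intro y hy
      have := (List.pairwise_append.mp h).2.2 y hy x (by simp)
      exact this
    simp only [List.foldl_cons, hins]
    have := ih (acc ++ [x]) (by simpa using h)
    simpa using this

theorem pv_sorted2_eq_self {α : Type} (xs : List α) (k1 k2 : α → Int)
    (h : xs.Pairwise (fun a b => k1 a < k1 b ∨ (k1 a = k1 b ∧ k2 a < k2 b))) :
    PySem.List.sorted2 xs k1 k2 = xs := by
  unfold PySem.List.sorted2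
  have := pv_foldl_insertBy_eq
    (fun a b => decide (k1 a < k1 b) || (!decide (k1 b < k1 a) && decide (k2 a < k2 b))) xs []
    (by
      simp only [List.nil_append]
      refine h.imp ?_
      intro a b hab
      rcases hab with hlt | ⟨heq, hlt2⟩ <;>
        simp only [Bool.or_eq_false_iff, Bool.and_eq_false_iff, decide_eq_false_iff_not,
          Bool.not_eq_false', decide_eq_true_eq, not_lt] <;> omega)
  simpa using this

theorem pv_pairwise_cells (matrix : List (List Int)) :
    (pvCellsOf matrix).Pairwise (fun c d => c.1 < d.1 ∨ (c.1 = d.1 ∧ c.2.1 < d.2.1)) := by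
  unfold pvCellsOf
  rw [List.pairwise_flatMap]
  constructor
  · intro i _
    rw [List.pairwise_filterMap]
    refine (PySem.List.pairwise_lt_pyRange_one 0 _).imp ?_
    intro a b hab c hc c' hc'
    split_ifs at hc hc'
    · cases hc; cases hc'; exact Or.inr ⟨rfl, hab⟩
  · refine (PySem.List.pairwise_lt_pyRange_one 0 _).imp ?_
    intro a b hab x hx y hy
    rw [List.mem_filterMap] at hx hy
    obtain ⟨jx, _, hjx⟩ := hx
    obtain ⟨jy, _, hjy⟩ := hy
    split_ifs at hjx hjy
    · cases hjx; cases hjy; exact Or.inl hab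


theorem findLocalMaximums_main (matrix : List (List Int)) :
    findLocalMaximums matrix = findLocalMaximums_alt matrix := by
  rw [A_shape, XA_eq, B_shape]
  apply pv_sorted2_eq_self
  rw [List.pairwise_map]
  refine ((pv_pairwise_cells matrix).filter _).imp ?_
  intro a b hab
  simpa [pysem] using hab

-- ===== VERDICT (by name: the statement is the Claim_ definition above) =====
theorem findLocalMaximums_spec : Claim_equal_findLocalMaximums := by
  intro matrix _ _
  unfold Spec_findLocalMaximums
  exact findLocalMaximums_main matrix
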